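-- pv_equiv track=rewrite | github.com/RobertIonut19/Python-Chess-Engine | Laborator_1/7.py | extractFirstNumber
-- ===== SOURCE A (Python) =====
-- def extractFirstNumber(text):
--     num = ""
--
--     for char in text:
--         if char.isdigit():
--             num += char
--         elif num:
--             break
--
--     if num:
--         return int(num)
--     else:
--         return "No number found"
-- ===== SOURCE B (Python) =====
-- def extractFirstNumber(text):
--     tokens = "".join(c if c.isdigit() else " " for c in text).split()
--     return int(tokens[0]) if tokens else "No number found"
-- ===== Notes on version B (the rewrite author's own statement) =====
-- stated objective: alternative
-- what changed: Replaced the accumulate-and-break character scan with a whole-string transform: mask every non-digit to a space, split the masked string into tokens (the maximal digit runs), and take the first token.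
-- outside the precondition, e.g. on extractFirstNumber('abc'): A returns 'No number found', B returns 'No number found'; on extractFirstNumber('No number found'): A returns 'No number found', B returns 'No number found'
import Mathlib
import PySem

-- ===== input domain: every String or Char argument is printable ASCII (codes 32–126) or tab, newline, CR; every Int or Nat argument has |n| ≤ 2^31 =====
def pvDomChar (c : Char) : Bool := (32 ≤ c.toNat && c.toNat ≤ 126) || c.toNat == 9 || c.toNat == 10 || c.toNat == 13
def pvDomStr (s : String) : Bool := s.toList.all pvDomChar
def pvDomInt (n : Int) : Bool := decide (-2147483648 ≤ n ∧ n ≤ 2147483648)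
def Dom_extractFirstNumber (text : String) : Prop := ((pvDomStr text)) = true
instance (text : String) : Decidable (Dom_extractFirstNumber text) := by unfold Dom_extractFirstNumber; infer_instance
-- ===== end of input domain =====

-- B replaces A's accumulate-and-break scan by a whole-string mask-to-spaces + split
-- transform whose first token is the first digit run (alternative, same cost).

-- ===== PORT A =====
-- A's for-loop with accumulator `num` and `break`: structural recursion over the characters.
def extractFirstNumberLoopA : List Char → List Char → List Char
  | [], num => num
  | c :: cs, num =>
    if c.isDigit then extractFirstNumberLoopA cs (num ++ [c])
    else if num ≠ [] then num
    else extractFirstNumberLoopA cs num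

def extractFirstNumber (text : String) : Option Int :=
  let num := extractFirstNumberLoopA text.toList []
  if num ≠ [] then PySem.Int.ofStr? (String.ofList num) else none

-- ===== PORT B =====
def extractFirstNumber_alt (text : String) : Option Int :=
  let masked := String.ofList (text.toList.map (fun c => if c.isDigit then c else ' '))
  let tokens := PySem.Str.split₀ masked
  match tokens with
  | t :: _ => PySem.Int.ofStr? t
  | [] => none

-- ===== PRECONDITION & SPEC =====
-- Pre_ excludes strings containing no digit: there Python A returns the string
-- "No number found", which is not a value of the declared Option Int type.
def Pre_extractFirstNumber (text : String) : Prop := text.toList.any Char.isDigit = true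
instance (text : String) : Decidable (Pre_extractFirstNumber text) := by unfold Pre_extractFirstNumber; infer_instance
def pvWitness_extractFirstNumber : String := "a12b"

def Spec_extractFirstNumber (text : String) (out : Option Int) : Prop := out = extractFirstNumber_alt text
instance (text : String) (out : Option Int) : Decidable (Spec_extractFirstNumber text out) := by unfold Spec_extractFirstNumber; infer_instance

-- ===== CLAIM (what is proved, stated in full; the proofs are below) =====
def Claim_equal_extractFirstNumber : Prop := ∀ (text : String), Dom_extractFirstNumber text → Pre_extractFirstNumber text → Spec_extractFirstNumber text (extractFirstNumber text)

-- ===== LEMMAS AND PROOFS =====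

def pvMask (cs : List Char) : List Char := cs.map (fun c => if c.isDigit then c else ' ')

lemma isspace_of_isDigit {c : Char} (h : c.isDigit = true) : PySem.Chars.isspace c = false := by
  simp only [Char.isDigit, Bool.and_eq_true, decide_eq_true_eq] at h
  have h48 : 48 ≤ c.toNat ∧ c.toNat ≤ 57 := ⟨h.1, h.2⟩
  clear h
  simp only [PySem.Chars.isspace]
  simp only [Bool.or_eq_false_iff, Bool.and_eq_false_iff, decide_eq_false_iff_not]
  omega

-- Phase 1 of A: while the accumulator is empty, A's loop just skips non-digits.
lemma loopA_dropWhile (cs : List Char) :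
    extractFirstNumberLoopA cs [] =
    extractFirstNumberLoopA (cs.dropWhile (fun c => !c.isDigit)) [] := by
  induction cs with
  | nil => rfl
  | cons c cs ih =>
    by_cases h : c.isDigit
    · simp [List.dropWhile, h]
    · simp [extractFirstNumberLoopA, List.dropWhile, h, ih]

-- Phase 2 of A: once the accumulator is nonempty, A's loop appends the digit prefix.
lemma loopA_takeWhile (cs num : List Char) (h : num ≠ []) :
    extractFirstNumberLoopA cs num = num ++ cs.takeWhile Char.isDigit := by
  induction cs generalizing num with
  | nil => simp [extractFirstNumberLoopA]
  | cons c cs ih =>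
    by_cases hc : c.isDigit
    · simp [extractFirstNumberLoopA, hc, ih (num ++ [c]) (by simp)]
    · simp [extractFirstNumberLoopA, hc, h, List.takeWhile]

lemma loopA_eq (cs : List Char) :
    extractFirstNumberLoopA cs [] =
    (cs.dropWhile (fun c => !c.isDigit)).takeWhile Char.isDigit := by
  rw [loopA_dropWhile]
  cases hd : cs.dropWhile (fun c => !c.isDigit) with
  | nil => rfl
  | cons c rest =>
    have hc : c.isDigit := by
      have := List.head?_dropWhile_not (p := fun c => !c.isDigit) (l := cs)
      simp [hd] at this
      simpa using this
    simp [extractFirstNumberLoopA, loopA_takeWhile rest [c] (by simp), List.takeWhile, hc]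

-- Phase 1 of B: split₀.go on the masked string skips leading non-digits (spaces).
lemma go_mask_dropWhile (cs : List Char) (acc : List (List Char)) :
    PySem.Chars.split₀.go (pvMask cs) [] acc =
    PySem.Chars.split₀.go (pvMask (cs.dropWhile (fun c => !c.isDigit))) [] acc := by
  induction cs with
  | nil => rfl
  | cons c cs ih =>
    by_cases h : c.isDigit
    · simp [List.dropWhile, h]
    · simp [pvMask, List.dropWhile, h, PySem.Chars.split₀.go] at ih ⊢
      simpa [PySem.Chars.isspace] using ih

-- acc-factoring for split₀.go: the finished tokens in acc are a reversed prefix of the result.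
lemma go_acc (s : List Char) (cur : List Char) (acc : List (List Char)) :
    PySem.Chars.split₀.go s cur acc = acc.reverse ++ PySem.Chars.split₀.go s cur [] := by
  induction s generalizing cur acc with
  | nil =>
    by_cases h : cur.isEmpty <;> simp [PySem.Chars.split₀.go, h]
  | cons c s ih =>
    by_cases hs : PySem.Chars.isspace c
    · by_cases h : cur.isEmpty
      · rw [PySem.Chars.split₀.go, PySem.Chars.split₀.go]
        simp only [hs, h, if_true]
        rw [ih [] acc]
      · rw [PySem.Chars.split₀.go, PySem.Chars.split₀.go]
        simp only [hs, h, if_true]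
        rw [ih [] (cur.reverse :: acc), ih [] [cur.reverse]]
        simp
    · rw [PySem.Chars.split₀.go, PySem.Chars.split₀.go]
      rw [if_neg hs, if_neg hs]
      rw [ih (c :: cur) acc]

-- Phase 2 of B: with a nonempty current token, go emits cur.reverse ++ the digit run first.
lemma go_mask_takeWhile (cs cur : List Char) (h : cur ≠ []) :
    ∃ t, PySem.Chars.split₀.go (pvMask cs) cur [] =
      (cur.reverse ++ cs.takeWhile Char.isDigit) :: t := by
  induction cs generalizing cur with
  | nil => exact ⟨[], by simp [pvMask, PySem.Chars.split₀.go, h]⟩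
  | cons c cs ih =>
    by_cases hc : c.isDigit
    · obtain ⟨t, ht⟩ := ih (c :: cur) (by simp)
      exact ⟨t, by simp [pvMask, PySem.Chars.split₀.go, hc, isspace_of_isDigit hc,
        List.takeWhile] at ht ⊢; simpa [pvMask] using ht⟩
    · refine ⟨PySem.Chars.split₀.go (pvMask cs) [] [], ?_⟩
      simp [pvMask, PySem.Chars.split₀.go, hc, PySem.Chars.isspace, h, List.takeWhile]
      rw [go_acc]
      simp

-- ===== VERDICT (by name: the statement is the Claim_ definition above) =====
theorem extractFirstNumber_spec : Claim_equal_extractFirstNumber := by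
  intro text _ hpre
  unfold Spec_extractFirstNumber extractFirstNumber extractFirstNumber_alt
  obtain ⟨x, hx, hxd⟩ := List.any_eq_true.mp hpre
  cases hd : text.toList.dropWhile (fun c => !c.isDigit) with
  | nil =>
    exact absurd ((List.dropWhile_eq_nil_iff.mp hd) x hx) (by simp [hxd])
  | cons c rest =>
    have hc : c.isDigit = true := by
      have := List.head?_dropWhile_not (p := fun c => !c.isDigit) (l := text.toList)
      simp [hd] at this
      simpa using this
    obtain ⟨t, ht⟩ := go_mask_takeWhile rest [c] (by simp)
    have hnum : extractFirstNumberLoopA text.toList [] = c :: List.takeWhile Char.isDigit rest := by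
      rw [loopA_eq, hd]
      simp [List.takeWhile, hc]
    simp only [hnum, ne_eq, reduceCtorEq, not_false_eq_true, if_pos]
    simp only [PySem.Str.split₀, PySem.Chars.split₀, String.toList_ofList]
    rw [show List.map (fun c => if c.isDigit = true then c else ' ') text.toList
        = pvMask text.toList from rfl]
    rw [go_mask_dropWhile text.toList [], hd]
    have hm2 : pvMask (c :: rest) = c :: pvMask rest := by simp [pvMask, hc]
    rw [hm2, PySem.Chars.split₀.go, isspace_of_isDigit hc]
    simp only [Bool.false_eq_true, if_false]
    rw [ht]
    simp [PySem.Int.ofStr?]
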